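-- pv_equiv track=rewrite | github.com/rubelw/OSSS | src/OSSS/ai/agents/query_data/handlers/permissions_handler.py | _build_permissions_markdown_table
-- ===== SOURCE A (Python) =====
-- from typing import Any, Dict, List, Sequence
--
-- MAX_MARKDOWN_ROWS = 50
--
-- def _escape_md(value: Any) -> str:
--     text = "" if value is None else str(value)
--     return text.replace("|", r"\|").replace("`", r"\`")
--
-- def _select_permissions_fields(rows: Sequence[Dict[str, Any]]) -> List[str]:
--     if not rows:
--         return []
--
--     preferred_order = [
--         "id",
--         "subject_type",
--         "subject_id",
--         "subject_code",
--         "resource_type",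
--         "resource_id",
--         "resource_code",
--         "action",
--         "scope",
--         "effect",
--         "status",
--         "created_at",
--         "updated_at",
--     ]
--
--     all_keys: List[str] = []
--     for r in rows:
--         for k in r.keys():
--             if k not in all_keys:
--                 all_keys.append(k)
--
--     ordered: List[str] = [c for c in preferred_order if c in all_keys]
--     ordered.extend(c for c in all_keys if c not in ordered)
--     return ordered
--
-- def _build_permissions_markdown_table(rows: List[Dict[str, Any]]) -> str:
--     if not rows:
--         return "No permissions records were found in the system."
--
--     total = len(rows)
--     display = rows[:MAX_MARKDOWN_ROWS]
--     fieldnames = _select_permissions_fields(display)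
--     if not fieldnames:
--         return "No permissions records were found in the system."
--
--     header_cells = ["#"] + fieldnames
--     header = "| " + " | ".join(header_cells) + " |\n"
--     separator = "| " + " | ".join(["---"] * len(header_cells)) + " |\n"
--     lines: List[str] = []
--
--     for idx, r in enumerate(display, start=1):
--         cells = [_escape_md(idx)] + [_escape_md(r.get(f, "")) for f in fieldnames]
--         lines.append("| " + " | ".join(cells) + " |")
--
--     table = header + separator + "\n".join(lines)
--     if total > MAX_MARKDOWN_ROWS:
--         table += (
--             f"\n\n_Showing first {MAX_MARKDOWN_ROWS} of {total} permission records. "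
--             "You can request CSV to see the full dataset._"
--         )
--     return table
-- ===== SOURCE B (Python) =====
-- MAX_MARKDOWN_ROWS = 50
--
-- _PREFERRED_ORDER = [
--     "id", "subject_type", "subject_id", "subject_code",
--     "resource_type", "resource_id", "resource_code",
--     "action", "scope", "effect", "status", "created_at", "updated_at",
-- ]
--
--
-- def _escape_md_cell(value):
--     text = "" if value is None else str(value)
--     return text.replace("|", r"\|").replace("`", r"\`")
--
--
-- def _md_line(cells):
--     return "| " + " | ".join(cells) + " |"
--
--
-- def _build_permissions_markdown_table(rows):
--     display = rows[:MAX_MARKDOWN_ROWS]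
--     seen = list(dict.fromkeys(k for r in display for k in r))
--     if not seen:
--         return "No permissions records were found in the system."
--     pos = {k: i for i, k in enumerate(_PREFERRED_ORDER)}
--     fieldnames = sorted(
--         seen,
--         key=lambda k: pos[k] if k in pos else len(pos) + seen.index(k),
--     )
--     out = [_md_line(["#"] + fieldnames), _md_line(["---"] * (len(fieldnames) + 1))]
--     for idx, r in enumerate(display, start=1):
--         out.append(_md_line([_escape_md_cell(v)
--                              for v in [idx] + [r.get(f, "") for f in fieldnames]]))
--     table = "\n".join(out)
--     if len(rows) > MAX_MARKDOWN_ROWS: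
--         table += (
--             f"\n\n_Showing first {MAX_MARKDOWN_ROWS} of {len(rows)} permission records. "
--             "You can request CSV to see the full dataset._"
--         )
--     return table
-- ===== Notes on version B (the rewrite author's own statement) =====
-- stated objective: alternative
-- what changed: Field selection is rebuilt as one dedup pass over all row keys followed by a single sort under a position key (preferred index, else len(preferred)+first-seen index) instead of the explicit two-pass preferred-then-remaining filter, and the table is assembled as a single '\n'.join over header, separator and data lines instead of string concatenation of partial blocks.
import Mathlib
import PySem

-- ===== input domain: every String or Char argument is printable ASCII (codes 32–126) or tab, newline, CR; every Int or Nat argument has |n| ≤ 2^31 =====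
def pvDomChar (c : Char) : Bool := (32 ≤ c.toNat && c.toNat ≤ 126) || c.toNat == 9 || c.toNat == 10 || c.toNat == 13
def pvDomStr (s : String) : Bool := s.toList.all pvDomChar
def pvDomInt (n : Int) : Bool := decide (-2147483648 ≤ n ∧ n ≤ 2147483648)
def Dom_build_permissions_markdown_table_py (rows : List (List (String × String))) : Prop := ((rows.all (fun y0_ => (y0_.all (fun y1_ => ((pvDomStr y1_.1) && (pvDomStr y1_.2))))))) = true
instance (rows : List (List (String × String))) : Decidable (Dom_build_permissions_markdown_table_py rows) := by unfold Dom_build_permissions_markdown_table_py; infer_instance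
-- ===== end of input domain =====

-- B restructures only the field-selection step (one dedup pass + a single stable sort by a
-- position key) and assembles the table as one "\n".join over all lines; same output, alternative decomposition.

-- a Python dict is passed as an association list: its keys() iteration is the distinct keys
-- in first-occurrence order, a .get is the first match (shared representation shim for both ports)
def pyRowKeys (r : List (String × String)) : List String :=
  PySem.List.dedup (r.map Prod.fst)

-- ===== PORT A =====
def pyEscapeMd (s : String) : String :=
  PySem.Str.replace (PySem.Str.replace s "|" "\\|") "`" "\\`"

def preferredOrderA : List String :=
  ["id", "subject_type", "subject_id", "subject_code", "resource_type", "resource_id",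
   "resource_code", "action", "scope", "effect", "status", "created_at", "updated_at"]

def selectPermissionsFields (rows : List (List (String × String))) : List String :=
  if rows = [] then []
  else
    let allKeys : List String := rows.foldl
      (fun acc r => (pyRowKeys r).foldl (fun a k => if k ∈ a then a else a ++ [k]) acc) []
    let ordered : List String := preferredOrderA.filter (fun c => decide (c ∈ allKeys))
    allKeys.foldl (fun acc c => if c ∈ acc then acc else acc ++ [c]) ordered

def build_permissions_markdown_table_py (rows : List (List (String × String))) : String :=
  if rows = [] then "No permissions records were found in the system."
  else
    let total : Int := rows.length
    let display := PySem.List.slice rows none (some 50)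
    let fieldnames := selectPermissionsFields display
    if fieldnames = [] then "No permissions records were found in the system."
    else
      let headerCells := "#" :: fieldnames
      let header := "| " ++ PySem.Str.join " | " headerCells ++ " |\n"
      let separator := "| " ++ PySem.Str.join " | " (List.replicate headerCells.length "---") ++ " |\n"
      let lines : List String := (PySem.List.enumerate display 1).foldl
        (fun acc p => acc ++ ["| " ++ PySem.Str.join " | "
          (pyEscapeMd (PySem.Int.toStr p.1) ::
            fieldnames.map (fun f => pyEscapeMd ((PySem.Dict.mk p.2).getD f ""))) ++ " |"]) []
      let table := header ++ separator ++ PySem.Str.join "\n" lines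
      if total > 50 then
        table ++ "\n\n_Showing first 50 of " ++ PySem.Int.toStr total ++
          " permission records. You can request CSV to see the full dataset._"
      else table

-- ===== PORT B =====
def escapeMdCellB (s : String) : String :=
  PySem.Str.replace (PySem.Str.replace s "|" "\\|") "`" "\\`"

def preferredOrderB : List String :=
  ["id", "subject_type", "subject_id", "subject_code", "resource_type", "resource_id",
   "resource_code", "action", "scope", "effect", "status", "created_at", "updated_at"]

def mdLine (cells : List String) : String :=
  "| " ++ PySem.Str.join " | " cells ++ " |"

def posDictB : PySem.Dict String Int :=
  (PySem.List.enumerate preferredOrderB 0).foldl (fun d p => d.insert p.2 p.1) PySem.Dict.empty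

def fieldKeyB (seen : List String) (k : String) : Int :=
  if posDictB.contains k then posDictB.getD k 0
  else (posDictB.size : Int) + (((PySem.List.index? seen k).getD 0 : Nat) : Int)

def build_permissions_markdown_table_py_alt (rows : List (List (String × String))) : String :=
  let display := PySem.List.slice rows none (some 50)
  let seen := PySem.List.dedup (display.flatMap (fun r => pyRowKeys r))
  if seen = [] then "No permissions records were found in the system."
  else
    let fieldnames := PySem.List.sorted seen (fieldKeyB seen)
    let out : List String := (PySem.List.enumerate display 1).foldl
      (fun acc p => acc ++ [mdLine ((PySem.Int.toStr p.1 ::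
          fieldnames.map (fun f => (PySem.Dict.mk p.2).getD f "")).map escapeMdCellB)])
      [mdLine ("#" :: fieldnames), mdLine (List.replicate (fieldnames.length + 1) "---")]
    let table := PySem.Str.join "\n" out
    if (rows.length : Int) > 50 then
      table ++ "\n\n_Showing first 50 of " ++ PySem.Int.toStr rows.length ++
        " permission records. You can request CSV to see the full dataset._"
    else table

-- ===== PRECONDITION & SPEC =====
def Spec_build_permissions_markdown_table_py (rows : List (List (String × String))) (out : String) : Prop := out = build_permissions_markdown_table_py_alt rows
instance (rows : List (List (String × String))) (out : String) : Decidable (Spec_build_permissions_markdown_table_py rows out) := by unfold Spec_build_permissions_markdown_table_py; infer_instance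

-- ===== CLAIM (what is proved, stated in full; the proofs are below) =====
def Claim_equal_build_permissions_markdown_table_py : Prop := ∀ (rows : List (List (String × String))), Dom_build_permissions_markdown_table_py rows → Spec_build_permissions_markdown_table_py rows (build_permissions_markdown_table_py rows)

-- ===== LEMMAS AND PROOFS =====

theorem foldl_update {α β : Type} [BEq α] [LawfulBEq α] (g : β → List α) (rows : List β) :
    ∀ s : List α, rows.foldl (fun acc r => PySem.Set.update acc (g r)) s
      = PySem.Set.update s (rows.flatMap g) := by
  induction rows with
  | nil => intro s; simp [PySem.Set.update]
  | cons r t ih =>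
    intro s
    simp only [List.foldl_cons, List.flatMap_cons, PySem.Set.update, List.foldl_append]
    exact ih _


theorem allKeys_eq_ofList' {α : Type} [BEq α] [LawfulBEq α] (g : List (α × α) → List α) (rows : List (List (α × α))) :
    rows.foldl (fun acc r => (g r).foldl (fun a k => if k ∈ a then a else a ++ [k]) acc) []
      = PySem.Set.ofList (rows.flatMap g) := by
  have h1 : ∀ (r : List (α × α)) (acc : List α), (g r).foldl (fun a k => if k ∈ a then a else a ++ [k]) acc = PySem.Set.update acc (g r) := by
    intro r acc
    simp only [PySem.Set.update]
    congr 1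
    funext a k
    rw [PySem.Set.add_eq_ite]
  calc rows.foldl (fun acc r => (g r).foldl (fun a k => if k ∈ a then a else a ++ [k]) acc) []
      = rows.foldl (fun acc r => PySem.Set.update acc (g r)) [] := by
        exact PySem.List.foldl_congr_mem (l := rows) (init := []) (f := fun acc r => (g r).foldl (fun a k => if k ∈ a then a else a ++ [k]) acc) (g := fun acc r => PySem.Set.update acc (g r)) (fun acc x _ => h1 x acc)
    _ = _ := by rw [foldl_update]; simp [PySem.Set.ofList, PySem.Set.update]


theorem update_eq_append_filter {α : Type} [BEq α] [LawfulBEq α] (ks : List α) (h : ks.Nodup) :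
    ∀ (s : List α), ks.foldl (fun acc c => if c ∈ acc then acc else acc ++ [c]) s
      = s ++ ks.filter (fun c => decide (c ∉ s)) := by
  induction ks with
  | nil => intro s; simp
  | cons c t ih =>
    intro s
    simp only [List.foldl_cons, List.filter_cons]
    by_cases hc : c ∈ s
    · simp [hc, ih (List.Nodup.of_cons h)]
    · rw [if_neg hc, ih (List.Nodup.of_cons h) (s ++ [c])]
      have hct : c ∉ t := (List.nodup_cons.mp h).1
      have hf : t.filter (fun x => decide (x ∉ s ++ [c])) = t.filter (fun x => decide (x ∉ s)) := by
        apply List.filter_congr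
        intro x hx
        have hxc : x ≠ c := fun he => hct (he ▸ hx)
        simp [List.mem_append, hxc]
      rw [hf]
      simp [hc]


theorem contains_posDict (c : String) : posDictB.contains c = true ↔ c ∈ preferredOrderB := by
  rw [PySem.Dict.contains_iff_mem_keys]
  have : posDictB.keys = preferredOrderB := by decide
  rw [this]


theorem index_self (l : List String) (h : l.Nodup) (k : Nat) (hk : k < l.length) :
    PySem.List.index? l l[k] = some k := by
  rw [PySem.List.index?_eq_idxOf?, List.idxOf?_eq_some_iff]
  refine ⟨hk, rfl, fun j hj he => ?_⟩
  have := (List.Nodup.getElem_inj_iff h).mp he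
  omega


theorem pairwise_index (l : List String) (h : l.Nodup) :
    l.Pairwise (fun a b => (((PySem.List.index? l a).getD 0 : Nat) : Int)
      < (((PySem.List.index? l b).getD 0 : Nat) : Int)) := by
  rw [List.pairwise_iff_getElem]
  intro i j hi hj hij
  rw [index_self l h i hi, index_self l h j hj]
  simp
  omega


theorem fields_sorted_core (ks : List String) (hnd : ks.Nodup) :
    (preferredOrderA.filter (fun c => decide (c ∈ ks)))
      ++ ks.filter (fun c => decide (c ∉ preferredOrderA))
      = PySem.List.sorted ks (fieldKeyB ks) := by
  have hprefnd : preferredOrderA.Nodup := by decide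
  have hf3 : preferredOrderB.Pairwise (fun a b => posDictB.getD a 0 < posDictB.getD b 0) := by decide
  have hf4 : ∀ c ∈ preferredOrderB, posDictB.getD c 0 < 13 := by decide
  have hsize : (posDictB.size : Int) = 13 := by decide
  have hkey_pref : ∀ c ∈ preferredOrderA, fieldKeyB ks c = posDictB.getD c 0 := by
    intro c hc
    unfold fieldKeyB
    rw [if_pos ((contains_posDict c).mpr hc)]
  have hkey_rest : ∀ c, c ∉ preferredOrderA → fieldKeyB ks c
      = 13 + (((PySem.List.index? ks c).getD 0 : Nat) : Int) := by
    intro c hc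
    unfold fieldKeyB
    rw [if_neg (fun hcc => hc ((contains_posDict c).mp hcc)), hsize]
  symm
  apply PySem.List.sorted_eq_of_perm_of_pairwise_lt
  · -- Perm
    have hP : (preferredOrderA.filter (fun c => decide (c ∈ ks))).Perm
        (ks.filter (fun c => decide (c ∈ preferredOrderA))) := by
      rw [List.perm_ext_iff_of_nodup (hprefnd.filter _) (hnd.filter _)]
      intro a
      simp [List.mem_filter, and_comm]
    refine (hP.append_right _).trans ?_
    have := List.filter_append_perm (fun c => decide (c ∈ preferredOrderA)) ks
    simpa using this
  · -- Pairwise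
    rw [List.pairwise_append]
    refine ⟨?_, ?_, ?_⟩
    · refine List.Pairwise.imp_of_mem ?_ (List.Pairwise.sublist List.filter_sublist hf3)
      intro a b ha hb hab
      have ha' := (List.mem_filter.mp ha).1
      have hb' := (List.mem_filter.mp hb).1
      rw [hkey_pref a ha', hkey_pref b hb']
      exact hab
    · refine List.Pairwise.imp_of_mem ?_ (List.Pairwise.sublist List.filter_sublist (pairwise_index ks hnd))
      intro a b ha hb hab
      have ha' : a ∉ preferredOrderA := by simpa using (List.mem_filter.mp ha).2
      have hb' : b ∉ preferredOrderA := by simpa using (List.mem_filter.mp hb).2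
      rw [hkey_rest a ha', hkey_rest b hb']
      omega
    · intro a ha b hb
      have ha' := (List.mem_filter.mp ha).1
      have hb' : b ∉ preferredOrderA := by simpa using (List.mem_filter.mp hb).2
      rw [hkey_pref a ha', hkey_rest b hb']
      have := hf4 a ha'
      have : (0:Int) ≤ (((PySem.List.index? ks b).getD 0 : Nat) : Int) := by positivity
      omega


theorem escape_eq : escapeMdCellB = pyEscapeMd := rfl

-- assembling header + separator + joined body lines is one join over all lines
theorem table_assemble (a b : String) (L : List String) (hL : L ≠ []) :
    (a ++ "\n") ++ ((b ++ "\n") ++ PySem.Str.join "\n" L) = PySem.Str.join "\n" (a :: b :: L) := by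
  obtain ⟨l0, rest, rfl⟩ := List.exists_cons_of_ne_nil hL
  apply String.toList_inj.mp
  simp [String.toList_append, PySem.Str.toList_join, PySem.Chars.join_cons_cons, List.append_assoc]

theorem fields_eq_sorted (rows : List (List (String × String))) (h : rows ≠ []) :
    selectPermissionsFields rows
      = PySem.List.sorted (PySem.List.dedup (rows.flatMap (fun r => pyRowKeys r)))
          (fieldKeyB (PySem.List.dedup (rows.flatMap (fun r => pyRowKeys r)))) := by
  unfold selectPermissionsFields
  rw [if_neg h]
  simp only []
  rw [allKeys_eq_ofList']
  rw [update_eq_append_filter _ (PySem.Set.nodup_ofList _)]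
  simp only [PySem.List.dedup_eq_ofList]
  have hnd : (PySem.Set.ofList (List.flatMap pyRowKeys rows) : List String).Nodup :=
    PySem.Set.nodup_ofList _
  generalize hg : (PySem.Set.ofList (List.flatMap pyRowKeys rows) : List String) = ks at hnd ⊢
  have hU : (ks.filter (fun c =>
        decide (c ∉ preferredOrderA.filter (fun c => decide (c ∈ ks)))))
      = ks.filter (fun c => decide (c ∉ preferredOrderA)) := by
    apply List.filter_congr
    intro x hx
    simp [List.mem_filter, hx]
  rw [hU]
  exact fields_sorted_core ks hnd

-- ===== VERDICT (by name: the statement is the Claim_ definition above) =====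

theorem append_newline (X : String) : ("| " ++ X) ++ " |\n" = (("| " ++ X) ++ " |") ++ "\n" := by
  apply String.toList_inj.mp
  have h : (" |\n" : String).toList = (" |" : String).toList ++ ("\n" : String).toList := by decide
  simp [String.toList_append, h, List.append_assoc]

theorem enumerate_ne_nil {α : Type} (l : List α) (h : l ≠ []) (s : Int) :
    PySem.List.enumerate l s ≠ [] := by
  intro he
  apply h
  have := congrArg List.length he
  rw [PySem.List.length_enumerate] at this
  simpa using this

theorem table_eq (F : List String) (display : List (List (String × String))) (hDne : display ≠ []) :
    "| " ++ PySem.Str.join " | " ("#" :: F) ++ " |\n" ++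
        ("| " ++ PySem.Str.join " | " (List.replicate ("#" :: F).length "---") ++ " |\n") ++
      PySem.Str.join "\n"
        (List.foldl
          (fun acc p =>
            acc ++
              ["| " ++
                    PySem.Str.join " | "
                      (pyEscapeMd (PySem.Int.toStr p.1) ::
                        List.map (fun f => pyEscapeMd ((PySem.Dict.mk p.2).getD f "")) F) ++
                  " |"])
          [] (PySem.List.enumerate display 1))
    = PySem.Str.join "\n"
        (List.foldl
          (fun acc p =>
            acc ++
              [mdLine
                  (List.map escapeMdCellB
                    (PySem.Int.toStr p.1 :: List.map (fun f => (PySem.Dict.mk p.2).getD f "") F))])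
          [mdLine ("#" :: F), mdLine (List.replicate (F.length + 1) "---")]
          (PySem.List.enumerate display 1)) := by
  rw [PySem.List.foldl_append_singleton_eq_map, PySem.List.foldl_append_singleton_eq_map]
  simp only [List.nil_append, List.cons_append, mdLine, escape_eq, List.map_cons, List.map_map,
    Function.comp_def, List.length_cons]
  rw [append_newline (PySem.Str.join " | " ("#" :: F)),
    append_newline (PySem.Str.join " | " (List.replicate (F.length + 1) "---")),
    String.append_assoc]
  exact table_assemble _ _ _ (by
    simp only [ne_eq, List.map_eq_nil_iff]
    exact enumerate_ne_nil display hDne 1)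

theorem build_permissions_markdown_table_py_spec : Claim_equal_build_permissions_markdown_table_py := by
  intro rows _
  unfold Spec_build_permissions_markdown_table_py
  unfold build_permissions_markdown_table_py build_permissions_markdown_table_py_alt
  by_cases hrows : rows = []
  · subst hrows; rfl
  · rw [if_neg hrows]
    simp only []
    have hDne : PySem.List.slice rows none (some 50) ≠ [] := by
      rw [PySem.List.slice_to (xs := rows) (b := 50) (by norm_num)]
      simp [List.take_eq_nil_iff, hrows]
    rw [fields_eq_sorted _ hDne]
    set display := PySem.List.slice rows none (some 50) with hD
    set ks := PySem.List.dedup (List.flatMap (fun r => pyRowKeys r) display) with hK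
    set F := PySem.List.sorted ks (fieldKeyB ks) with hF
    by_cases hks : ks = []
    · rw [if_pos (by rw [hF, hks]; rfl), if_pos hks]
    · have hFne : F ≠ [] := by
        rw [hF]
        simp [PySem.List.sorted_eq_nil_iff, hks]
      rw [if_neg hFne, if_neg hks]
      rw [table_eq F display hDne]
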